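-- pv_equiv track=rewrite | github.com/KungCheops/aigrader | examples/assignment-12/assignment-12-R-00614335918277.py | indexString
-- ===== SOURCE A (Python) =====
-- def indexString(s, k):
--     ds = {}
--     last_char = ''
--     count = 0
--     for current_char in s:
--         if current_char == last_char:
--             count += 1
--             if count == k:
--                 if current_char * count in ds:
--                     ds[current_char * count] += 1
--                 else:
--                     ds[current_char * count] = 1
--                 count -= 1
--         else:
--             last_char = current_char
--             count = 1
--     return ds
-- ===== SOURCE B (Python) =====
-- def indexString(s, k):
--     # One pass over run lengths: each maximal run of length L contributes
--     # L-k+1 occurrences of its char repeated k times.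
--     if k < 1:
--         return {}
--     ds = {}
--     cur = ''
--     L = 0
--     for c in s:
--         if c == cur:
--             L += 1
--         else:
--             if L >= k:
--                 key = cur * k
--                 ds[key] = ds.get(key, 0) + (L - k + 1)
--             cur = c
--             L = 1
--     if L >= k:
--         key = cur * k
--         ds[key] = ds.get(key, 0) + (L - k + 1)
--     return ds
-- ===== Notes on version B (the rewrite author's own statement) =====
-- stated objective: alternative
-- what changed: A updates the dict once per position of every qualifying window using a count==k-then-decrement trick and rebuilds the char*k key at each hit; B makes a single run-length pass, adding L-k+1 to the key once per maximal run, so the dict is touched (and the key string built) once per run instead of once per matching position.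
-- intended difference: On k = 1 with a nonempty string A returns {} (its count==k test can only fire from the second character of a run, so k=1 never matches), while B returns the intended answer: each character occurrence counted under its own 1-char key. — e.g. on indexString("aa", 1): A returns [], B returns [("a", 2)]
import Mathlib
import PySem

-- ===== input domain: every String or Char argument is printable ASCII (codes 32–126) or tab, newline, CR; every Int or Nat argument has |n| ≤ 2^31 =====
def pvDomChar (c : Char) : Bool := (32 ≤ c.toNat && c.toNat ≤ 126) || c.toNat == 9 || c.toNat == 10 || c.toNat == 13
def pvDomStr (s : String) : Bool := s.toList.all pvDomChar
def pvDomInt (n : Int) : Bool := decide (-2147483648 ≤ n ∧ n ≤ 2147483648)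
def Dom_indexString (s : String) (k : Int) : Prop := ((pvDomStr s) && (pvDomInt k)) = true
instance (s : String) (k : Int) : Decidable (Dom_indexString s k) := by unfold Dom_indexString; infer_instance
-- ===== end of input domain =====

-- B replaces A's per-position "count==k, record, decrement" trick by a single run-length
-- pass that adds L-k+1 per maximal run at each run boundary (objective: alternative).


-- shared helper: Python's `str * int`
def pyStrMul (s : String) (n : Int) : String := String.ofList (PySem.List.pyRepeat s.toList n)

-- ===== PORT A =====
-- loop body of A; state = (ds, last_char, count); current_char is the 1-char string of c
def stepA (k : Int) (st : PySem.Dict String Int × String × Int) (c : Char) :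
    PySem.Dict String Int × String × Int :=
  match st with
  | (ds, last, count) =>
    let cur := String.ofList [c]
    if cur = last then
      let count := count + 1
      if count = k then
        let key := pyStrMul cur count
        let ds := if ds.contains key then ds.insert key (ds.getD key 0 + 1) else ds.insert key 1
        (ds, last, count - 1)
      else (ds, last, count)
    else (ds, cur, 1)

def indexString (s : String) (k : Int) : List (String × Int) :=
  (s.toList.foldl (stepA k) (PySem.Dict.empty, "", 0)).1.items

-- ===== PORT B =====
-- B's flush of the current run (the duplicated `if L >= k: …` block of Source B)
def flushB (k : Int) (ds : PySem.Dict String Int) (cur : String) (L : Int) :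
    PySem.Dict String Int :=
  if k ≤ L then
    let key := pyStrMul cur k
    ds.insert key (ds.getD key 0 + (L - k + 1))
  else ds

-- B's loop body; state = (ds, cur, L)
def stepB (k : Int) (st : PySem.Dict String Int × String × Int) (c : Char) :
    PySem.Dict String Int × String × Int :=
  match st with
  | (ds, cur, L) =>
    if String.ofList [c] = cur then (ds, cur, L + 1)
    else (flushB k ds cur L, String.ofList [c], 1)

def indexString_alt (s : String) (k : Int) : List (String × Int) :=
  if k < 1 then []
  else
    match s.toList.foldl (stepB k) (PySem.Dict.empty, "", 0) with
    | (ds, cur, L) => (flushB k ds cur L).items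

-- ===== PRECONDITION & SPEC =====
-- On k = 1 with a nonempty string A returns {} (its count==k test only fires from the 2nd char of
-- a run onwards, so runs of length 1 are never counted and k = 1 never matches), while B returns
-- the intended count of length-1 runs: every character occurrence, keyed by that character.
def D_indexString (s : String) (k : Int) : Prop := k = 1 ∧ s ≠ ""
instance (s : String) (k : Int) : Decidable (D_indexString s k) := by unfold D_indexString; infer_instance

def Spec_indexString (s : String) (k : Int) (out : List (String × Int)) : Prop :=
  ¬ D_indexString s k → out = indexString_alt s k
instance (s : String) (k : Int) (out : List (String × Int)) : Decidable (Spec_indexString s k out) := by unfold Spec_indexString; infer_instance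

def pvDiffWitness_indexString : String × Int := ("aa", 1)
def pvDiffWitnessOut_indexString : (List (String × Int)) × (List (String × Int)) :=
  ([], [("a", 2)])

-- ===== CLAIM (what is proved, stated in full; the proofs are below) =====
def Claim_unchanged_indexString : Prop := ∀ (s : String) (k : Int), Dom_indexString s k → Spec_indexString s k (indexString s k)
def Claim_changed_indexString : Prop := Dom_indexString (pvDiffWitness_indexString.1) (pvDiffWitness_indexString.2) ∧ D_indexString (pvDiffWitness_indexString.1) (pvDiffWitness_indexString.2) ∧ indexString (pvDiffWitness_indexString.1) (pvDiffWitness_indexString.2) = pvDiffWitnessOut_indexString.1 ∧ indexString_alt (pvDiffWitness_indexString.1) (pvDiffWitness_indexString.2) = pvDiffWitnessOut_indexString.2 ∧ pvDiffWitnessOut_indexString.1 ≠ pvDiffWitnessOut_indexString.2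
def Claim_exact_indexString : Prop := ∀ (s : String) (k : Int), Dom_indexString s k → D_indexString s k → indexString s k ≠ indexString_alt s k

-- ===== LEMMAS AND PROOFS =====

theorem single_ne_empty (c : Char) : String.ofList [c] ≠ "" := by
  intro h
  have := congrArg String.toList h
  simp at this

-- invariant tying A's state to B's state, for k ≥ 2: same current character, A's counter is the
-- run length capped at k-1, and A's dict is B's dict with the current run already flushed
def InvAB (k : Int) (a b : PySem.Dict String Int × String × Int) : Prop :=
  a.2.1 = b.2.1 ∧ a.2.2 = min b.2.2 (k - 1) ∧ a.1 = flushB k b.1 b.2.1 b.2.2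

theorem inv_step (k : Int) (hk : 2 ≤ k) (a b : PySem.Dict String Int × String × Int)
    (h : InvAB k a b) (c : Char) : InvAB k (stepA k a c) (stepB k b c) := by
  obtain ⟨dsA, lastA, countA⟩ := a
  obtain ⟨dsB, lastA, LB⟩ := b
  obtain ⟨h1, h2, h3⟩ := h
  simp only at h1 h2 h3
  subst h1
  by_cases hc : String.ofList [c] = lastA
  · -- same run in both
    simp only [stepA, stepB, if_pos hc]
    by_cases hhit : countA + 1 = k
    · have hLB : k - 1 ≤ LB := by omega
      simp only [if_pos hhit]
      refine ⟨rfl, ?_, ?_⟩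
      · show countA + 1 - 1 = min (LB + 1) (k - 1)
        omega
      · show (if dsA.contains (pyStrMul (String.ofList [c]) (countA+1)) then
                dsA.insert _ (dsA.getD _ 0 + 1) else dsA.insert _ 1)
             = flushB k dsB lastA (LB + 1)
        have hkey : pyStrMul (String.ofList [c]) (countA + 1) = pyStrMul lastA k := by
          rw [hc, hhit]
        rw [hkey]
        set key := pyStrMul lastA k with hkeydef
        have hins : (if dsA.contains key then dsA.insert key (dsA.getD key 0 + 1)
            else dsA.insert key 1) = dsA.insert key (dsA.getD key 0 + 1) := by
          by_cases hcon : dsA.contains key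
          · simp [hcon]
          · have := PySem.Dict.getD_of_not_contains dsA (k := key) 0 (by simpa using hcon)
            simp [hcon, this]
        rw [hins]
        rcases lt_or_ge LB k with hLlt | hLge
        · -- LB = k - 1 : first hit of the run
          have hA : dsA = dsB := by
            rw [h3]; unfold flushB; rw [if_neg (by omega)]
          rw [hA]
          unfold flushB
          rw [if_pos (by omega), ← hkeydef]
          congr 1
          omega
        · -- LB ≥ k : later hit of the run
          have hA : dsA = dsB.insert key (dsB.getD key 0 + (LB - k + 1)) := by
            rw [h3]; unfold flushB; rw [if_pos (by omega), ← hkeydef]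
          rw [hA, PySem.Dict.getD_insert_self, PySem.Dict.insert_insert_self]
          unfold flushB
          rw [if_pos (by omega), ← hkeydef]
          congr 1
          omega
    · -- no hit: the run is still shorter than k
      have hL : LB < k - 1 := by omega
      simp only [if_neg hhit]
      refine ⟨rfl, ?_, ?_⟩
      · show countA + 1 = min (LB + 1) (k - 1)
        omega
      · show dsA = flushB k dsB lastA (LB + 1)
        rw [h3]
        unfold flushB
        rw [if_neg (by omega), if_neg (by omega)]
  · -- run boundary: B flushes, A starts a new count
    simp only [stepA, stepB, if_neg hc]
    refine ⟨rfl, ?_, ?_⟩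
    · show (1 : Int) = min 1 (k - 1)
      omega
    · show dsA = flushB k (flushB k dsB lastA LB) (String.ofList [c]) 1
      rw [h3]
      unfold flushB
      rw [if_neg (show ¬ k ≤ 1 by omega)]

theorem inv_foldl (k : Int) (hk : 2 ≤ k) (cs : List Char)
    (a b : PySem.Dict String Int × String × Int) (h : InvAB k a b) :
    InvAB k (cs.foldl (stepA k) a) (cs.foldl (stepB k) b) := by
  induction cs generalizing a b with
  | nil => exact h
  | cons c cs ih => exact ih _ _ (inv_step k hk a b h c)

-- for k ≤ 0, A's count stays ≥ 0, so count+1 = k never fires and the dict stays empty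
theorem A_empty_of_nonpos (k : Int) (hk : k ≤ 0) (cs : List Char)
    (a : PySem.Dict String Int × String × Int) (h : a.1 = PySem.Dict.empty ∧ 0 ≤ a.2.2) :
    (cs.foldl (stepA k) a).1 = PySem.Dict.empty := by
  induction cs generalizing a with
  | nil => exact h.1
  | cons c cs ih =>
    refine ih _ ?_
    obtain ⟨ds, last, count⟩ := a
    obtain ⟨h1, h2⟩ := h
    simp only at h1 h2
    subst h1
    simp only [stepA]
    split
    · rw [if_neg (by omega)]
      exact ⟨rfl, show (0 : Int) ≤ count + 1 by omega⟩
    · exact ⟨rfl, show (0 : Int) ≤ 1 by omega⟩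

-- for k = 1, A's count==k test needs count+1 = 1, but inside a run count ≥ 1: dict stays empty
theorem A_empty_of_one (cs : List Char) (a : PySem.Dict String Int × String × Int)
    (h : a.1 = PySem.Dict.empty ∧ (a.2.1 = "" ∨ 1 ≤ a.2.2)) :
    (cs.foldl (stepA 1) a).1 = PySem.Dict.empty := by
  induction cs generalizing a with
  | nil => exact h.1
  | cons c cs ih =>
    refine ih _ ?_
    obtain ⟨ds, last, count⟩ := a
    obtain ⟨h1, h2⟩ := h
    simp only at h1 h2
    subst h1
    simp only [stepA]
    by_cases hc : String.ofList [c] = last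
    · have hcount : 1 ≤ count := by
        rcases h2 with h2 | h2
        · exact absurd (h2 ▸ hc) (single_ne_empty c)
        · exact h2
      rw [if_pos hc, if_neg (by omega)]
      exact ⟨rfl, Or.inr (show (1 : Int) ≤ count + 1 by omega)⟩
    · rw [if_neg hc]
      exact ⟨rfl, Or.inr (le_refl (1 : Int))⟩

-- B's run length is ≥ 1 after any step
theorem B_L_pos (k : Int) (cs : List Char) (b : PySem.Dict String Int × String × Int)
    (h : 1 ≤ b.2.2) : 1 ≤ (cs.foldl (stepB k) b).2.2 := by
  induction cs generalizing b with
  | nil => exact h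
  | cons c cs ih =>
    refine ih _ ?_
    obtain ⟨ds, cur, L⟩ := b
    simp only at h
    simp only [stepB]
    split
    · show (1 : Int) ≤ L + 1
      omega
    · show (1 : Int) ≤ 1
      omega

theorem insert_items_ne_nil (d : PySem.Dict String Int) (key : String) (v : Int) :
    (d.insert key v).items ≠ [] := by
  rw [PySem.Dict.items_insert]
  by_cases hcon : d.contains key
  · rw [if_pos hcon]
    have hmem : key ∈ d.keys := (PySem.Dict.contains_iff_mem_keys d key).mp hcon
    have hne : d.items ≠ [] := by
      intro hnil
      rw [PySem.Dict.keys, hnil] at hmem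
      simp at hmem
    intro hmap
    exact hne (List.map_eq_nil_iff.mp hmap)
  · rw [if_neg hcon]
    simp

-- ===== VERDICT (by name: the statement is the Claim_ definition above) =====
theorem indexString_spec : Claim_unchanged_indexString := by
  intro s k _ hnd
  rcases lt_trichotomy k 1 with hk | hk | hk
  · -- k ≤ 0: A's dict stays empty, B returns [] by its guard
    have hA : indexString s k = [] := by
      unfold indexString
      rw [A_empty_of_nonpos k (by omega) s.toList _ ⟨rfl, le_refl 0⟩]
      rfl
    rw [hA]
    unfold indexString_alt
    rw [if_pos hk]
  · -- k = 1 outside D means s = ""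
    subst hk
    have hs : s = "" := by
      by_contra hne
      exact hnd ⟨rfl, hne⟩
    subst hs
    rfl
  · -- k ≥ 2: run-length invariant
    have hk2 : 2 ≤ k := by omega
    have hinv := inv_foldl k hk2 s.toList (PySem.Dict.empty, "", 0) (PySem.Dict.empty, "", 0)
      ⟨rfl, show (0 : Int) = min 0 (k - 1) by omega,
       by show PySem.Dict.empty = flushB k PySem.Dict.empty "" 0
          unfold flushB; rw [if_neg (by omega)]⟩
    unfold indexString indexString_alt
    rw [if_neg (by omega)]
    rcases hb : s.toList.foldl (stepB k) (PySem.Dict.empty, "", 0) with ⟨dsB, curB, LB⟩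
    rw [hb] at hinv
    obtain ⟨-, -, h3⟩ := hinv
    simp only at h3
    rw [h3]

theorem indexString_changed : Claim_changed_indexString := by
  unfold Claim_changed_indexString; decide

theorem indexString_tight : Claim_exact_indexString := by
  intro s k _ hd
  obtain ⟨hk, hs⟩ := hd
  subst hk
  have hA : indexString s 1 = [] := by
    unfold indexString
    rw [A_empty_of_one s.toList _ ⟨rfl, Or.inl rfl⟩]
    rfl
  rw [hA]
  intro hB
  unfold indexString_alt at hB
  rw [if_neg (by omega)] at hB
  have hcs : s.toList ≠ [] := by
    intro h
    apply hs
    simpa using congrArg String.ofList h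
  obtain ⟨c, cs, hcons⟩ := List.exists_cons_of_ne_nil hcs
  rw [hcons] at hB
  have hstep : stepB 1 (PySem.Dict.empty, "", 0) c = (PySem.Dict.empty, String.ofList [c], 1) := by
    simp only [stepB]
    rw [if_neg (single_ne_empty c)]
    unfold flushB
    rw [if_neg (by omega)]
  rw [List.foldl_cons, hstep] at hB
  have hL := B_L_pos 1 cs (PySem.Dict.empty, String.ofList [c], 1) (le_refl 1)
  rcases hb : cs.foldl (stepB 1) (PySem.Dict.empty, String.ofList [c], 1) with ⟨ds, cur, L⟩
  rw [hb] at hB hL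
  simp only at hB hL
  unfold flushB at hB
  rw [if_pos hL] at hB
  exact insert_items_ne_nil _ _ _ hB.symm
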